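-- pv_equiv track=rewrite | github.com/ARTEAGA1811/PracticandoEjerciciosPython | paraElEvento/DosEjercicio.py | solucionar
-- ===== SOURCE A (Python) =====
-- def solucionar(numbers):
--     registro = {}
--     sinRepetir = list(set(numbers))
--
--     for i in sinRepetir:
--         sumatoria = 0
--         for k in numbers:
--             if(k!=i):
--                 sumatoria+=k
--         registro[i] = sumatoria
--
--     #ahora selecciono el correcto.
--     aux = list(registro.values())
--     claves = list(registro.keys())
--     minimaSum = min(aux)
--     listAux = []
--     for i in claves:
--         if(registro[i] == minimaSum):
--             listAux.append(i)
--
--     return(max(listAux))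
-- ===== SOURCE B (Python) =====
-- def solucionar(numbers):
--     counts = {}
--     for x in numbers:
--         counts[x] = counts.get(x, 0) + 1
--     best = None
--     for i, c in counts.items():
--         key = (i * c, i)
--         if best is None or key > best:
--             best = key
--     return best[1]
-- ===== Notes on version B (the rewrite author's own statement) =====
-- stated objective: faster
-- what changed: Instead of recomputing the sum of all other elements for every distinct value (nested scans) and then a min/filter/max selection, B counts occurrences in one pass and picks the single key maximizing (i*count(i), i) lexicographically, since sum-excluding-i = total - i*count(i).
import Mathlib
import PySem

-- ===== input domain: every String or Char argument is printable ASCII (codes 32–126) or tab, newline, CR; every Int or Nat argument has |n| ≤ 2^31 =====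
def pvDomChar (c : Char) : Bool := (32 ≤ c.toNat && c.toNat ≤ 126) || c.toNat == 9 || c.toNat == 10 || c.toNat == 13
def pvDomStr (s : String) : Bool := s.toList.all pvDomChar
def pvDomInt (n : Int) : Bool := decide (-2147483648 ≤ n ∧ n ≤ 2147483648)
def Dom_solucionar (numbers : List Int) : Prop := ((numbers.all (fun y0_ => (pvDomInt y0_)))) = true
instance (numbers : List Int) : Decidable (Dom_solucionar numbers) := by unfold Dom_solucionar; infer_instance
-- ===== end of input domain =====

-- B replaces A's nested per-distinct-value rescans and min/filter/max selection by one counting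
-- pass and a single lexicographic maximum of (i*count(i), i) (sum-excluding-i = total - i*count(i)).

-- ===== PORT A =====
def solucionar (numbers : List Int) : Int :=
  let sinRepetir : List Int := PySem.Set.ofList numbers
  let registro : PySem.Dict Int Int :=
    sinRepetir.foldl (fun d i =>
      d.insert i (numbers.foldl (fun sumatoria k => if k ≠ i then sumatoria + k else sumatoria) 0))
      PySem.Dict.empty
  let aux := registro.values
  let claves := registro.keys
  match PySem.List.min? aux (fun x => x) with
  | none => 0   -- min([]) raises ValueError; excluded by Pre_
  | some minimaSum =>
    -- registro[i]: i is always a key of registro here, so getD's default is never read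
    let listAux := claves.foldl (fun l i => if registro.getD i 0 = minimaSum then l ++ [i] else l) []
    match PySem.List.max? listAux (fun x => x) with
    | none => 0   -- unreachable under Pre_
    | some m => m

-- ===== PORT B =====
def solucionar_alt (numbers : List Int) : Int :=
  let counts : PySem.Dict Int Int :=
    numbers.foldl (fun d x => d.insert x (d.getD x 0 + 1)) PySem.Dict.empty
  let best : Option (Int × Int) :=
    counts.items.foldl (fun b p =>
      match b with
      | none => some (p.1 * p.2, p.1)
      | some bk => if bk.1 < p.1 * p.2 ∨ (bk.1 = p.1 * p.2 ∧ bk.2 < p.1) then some (p.1 * p.2, p.1) else some bk)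
      none
  match best with
  | none => 0   -- best[1] on None raises TypeError; excluded by Pre_
  | some bk => bk.2

-- ===== PRECONDITION & SPEC =====
-- Pre_ excludes only the empty list, on which A raises ValueError (min of empty sequence).
def Pre_solucionar (numbers : List Int) : Prop := numbers ≠ []
instance (numbers : List Int) : Decidable (Pre_solucionar numbers) := by unfold Pre_solucionar; infer_instance
def pvWitness_solucionar : List Int := [1, 2, 2]

def Spec_solucionar (numbers : List Int) (out : Int) : Prop := out = solucionar_alt numbers
instance (numbers : List Int) (out : Int) : Decidable (Spec_solucionar numbers out) := by unfold Spec_solucionar; infer_instance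

-- ===== CLAIM (what is proved, stated in full; the proofs are below) =====
def Claim_equal_solucionar : Prop := ∀ (numbers : List Int), Dom_solucionar numbers → Pre_solucionar numbers → Spec_solucionar numbers (solucionar numbers)

-- ===== LEMMAS AND PROOFS =====

-- lexicographic "≤" on (value, key) pairs
def pvLeLex (q p : Int × Int) : Prop := q.1 < p.1 ∨ (q.1 = p.1 ∧ q.2 ≤ p.2)

-- the combine step of B's running maximum
def pvLex (b p : Int × Int) : Int × Int :=
  if b.1 < p.1 ∨ (b.1 = p.1 ∧ b.2 < p.2) then p else b

theorem pvLex_cases (b p : Int × Int) : pvLex b p = b ∨ pvLex b p = p := by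
  unfold pvLex; split <;> simp

theorem pvLeLex_lex_left (b p : Int × Int) : pvLeLex b (pvLex b p) := by
  unfold pvLeLex pvLex; split <;> omega

theorem pvLeLex_lex_right (b p : Int × Int) : pvLeLex p (pvLex b p) := by
  unfold pvLeLex pvLex; split <;> omega

theorem pvLeLex_trans {a b c : Int × Int} (h1 : pvLeLex a b) (h2 : pvLeLex b c) : pvLeLex a c := by
  unfold pvLeLex at *; omega

theorem foldl_pvLex_mem (ps : List (Int × Int)) (b : Int × Int) :
    ps.foldl pvLex b = b ∨ ps.foldl pvLex b ∈ ps := by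
  induction ps generalizing b with
  | nil => simp
  | cons p t ih =>
    simp only [List.foldl_cons]
    rcases ih (pvLex b p) with h | h
    · rcases pvLex_cases b p with h2 | h2 <;> rw [h, h2] <;> simp
    · simp [h]

theorem foldl_pvLex_isMax (ps : List (Int × Int)) (b : Int × Int) :
    pvLeLex b (ps.foldl pvLex b) ∧ ∀ q ∈ ps, pvLeLex q (ps.foldl pvLex b) := by
  induction ps generalizing b with
  | nil => exact ⟨Or.inr ⟨rfl, le_refl _⟩, by simp⟩
  | cons p t ih =>
    obtain ⟨h1, h2⟩ := ih (pvLex b p)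
    refine ⟨pvLeLex_trans (pvLeLex_lex_left b p) h1, ?_⟩
    intro q hq
    rcases List.mem_cons.mp hq with rfl | hq
    · exact pvLeLex_trans (pvLeLex_lex_right b q) h1
    · exact h2 q hq

-- B's loop body, named (identical to the lambda in solucionar_alt)
def pvStep (a : Option (Int × Int)) (p : Int × Int) : Option (Int × Int) :=
  match a with
  | none => some (p.1 * p.2, p.1)
  | some bk => if bk.1 < p.1 * p.2 ∨ (bk.1 = p.1 * p.2 ∧ bk.2 < p.1) then some (p.1 * p.2, p.1) else some bk

-- B's option-valued fold equals a plain pvLex fold once the accumulator is some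
theorem foldl_opt_some (ps : List (Int × Int)) (b : Int × Int) :
    ps.foldl pvStep (some b)
    = some (ps.foldl (fun a p => pvLex a (p.1 * p.2, p.1)) b) := by
  induction ps generalizing b with
  | nil => rfl
  | cons p t ih =>
    have hstep : pvStep (some b) p = some (pvLex b (p.1 * p.2, p.1)) := by
      show (if b.1 < p.1 * p.2 ∨ (b.1 = p.1 * p.2 ∧ b.2 < p.1) then some ((p.1 * p.2, p.1) : Int × Int) else some b)
          = some (if b.1 < p.1 * p.2 ∨ (b.1 = p.1 * p.2 ∧ b.2 < p.1) then (p.1 * p.2, p.1) else b)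
      split <;> rfl
    rw [List.foldl_cons, hstep, ih, List.foldl_cons]

-- A's inner loop: sum of the elements different from i
theorem foldl_sum_excl (l : List Int) (i a : Int) :
    l.foldl (fun s k => if k ≠ i then s + k else s) a = a + l.sum - i * (l.count i : Int) := by
  induction l generalizing a with
  | nil => simp
  | cons k t ih =>
    rw [List.foldl_cons]
    by_cases h : k = i
    · subst h
      rw [if_neg (by simp), ih]
      simp
      ring
    · rw [if_pos h, ih]
      simp [h]
      ring

theorem pvOfList_ne_nil (numbers : List Int) (h : numbers ≠ []) :
    PySem.Set.ofList numbers ≠ [] := by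
  obtain ⟨x, hx⟩ := List.exists_mem_of_ne_nil numbers h
  intro hnil
  have : x ∈ PySem.Set.ofList numbers := (PySem.Set.mem_ofList _ _).mpr hx
  rw [hnil] at this
  exact absurd this (List.not_mem_nil)

-- the characterizing property both results satisfy, with v i = i * count(i)
def pvGood (numbers : List Int) (r : Int) : Prop :=
  r ∈ PySem.Set.ofList numbers ∧
  ∀ j ∈ PySem.Set.ofList numbers,
    pvLeLex (j * (numbers.count j : Int), j) (r * (numbers.count r : Int), r)

theorem pvGood_unique {numbers : List Int} {r r' : Int}
    (h : pvGood numbers r) (h' : pvGood numbers r') : r = r' := by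
  obtain ⟨hm, hb⟩ := h
  obtain ⟨hm', hb'⟩ := h'
  have h1 := hb r' hm'
  have h2 := hb' r hm
  unfold pvLeLex at h1 h2
  omega

theorem solucionar_alt_good (numbers : List Int) (h : numbers ≠ []) :
    pvGood numbers (solucionar_alt numbers) := by
  obtain ⟨d, t, hD⟩ := List.exists_cons_of_ne_nil (pvOfList_ne_nil numbers h)
  have hitems : (numbers.foldl (fun d x => d.insert x (d.getD x 0 + 1)) PySem.Dict.empty).items
      = (d, (numbers.count d : Int)) :: t.map (fun k => (k, (numbers.count k : Int))) := by
    rw [PySem.Dict.foldl_insert_getD_add_one_eq_counter, PySem.Dict.items_counter, hD, List.map_cons]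
  have halt : solucionar_alt numbers
      = ((t.map (fun i => (i * (numbers.count i : Int), i))).foldl pvLex
          (d * (numbers.count d : Int), d)).2 := by
    show (match ((numbers.foldl (fun d x => d.insert x (d.getD x 0 + 1)) PySem.Dict.empty).items.foldl pvStep none) with
          | none => (0 : Int) | some bk => bk.2) = _
    rw [hitems, List.foldl_cons]
    have h0 : pvStep none (d, (numbers.count d : Int)) = some (d * (numbers.count d : Int), d) := rfl
    rw [h0, foldl_opt_some, List.foldl_map, ← List.foldl_map (f := fun i : Int => (i * (numbers.count i : Int), i)) (g := pvLex)]
  set ps := t.map (fun i => (i * (numbers.count i : Int), i)) with hps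
  set b := ((d * (numbers.count d : Int), d) : Int × Int) with hb
  have hmem := foldl_pvLex_mem ps b
  obtain ⟨hble, hallle⟩ := foldl_pvLex_isMax ps b
  have hr : ps.foldl pvLex b ∈ (PySem.Set.ofList numbers).map (fun i => (i * (numbers.count i : Int), i)) := by
    rw [hD, List.map_cons, ← hps]
    rcases hmem with h1 | h1
    · rw [h1, hb]; exact List.mem_cons_self
    · exact List.mem_cons_of_mem _ h1
  obtain ⟨m, hmD, hmr⟩ := List.mem_map.mp hr
  constructor
  · rw [halt, ← hmr]
    exact hmD
  · intro j hj
    rw [halt, ← hmr]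
    have : pvLeLex (j * (numbers.count j : Int), j) (ps.foldl pvLex b) := by
      rw [hD] at hj
      rcases List.mem_cons.mp hj with rfl | hj
      · exact hble
      · exact hallle _ (List.mem_map.mpr ⟨j, hj, rfl⟩)
    simpa [hmr] using this

theorem solucionar_good (numbers : List Int) (h : numbers ≠ []) :
    pvGood numbers (solucionar numbers) := by
  obtain ⟨d, t, hD⟩ := List.exists_cons_of_ne_nil (pvOfList_ne_nil numbers h)
  set S : Int → Int := fun i => numbers.foldl (fun s k => if k ≠ i then s + k else s) 0 with hS
  set registro := (PySem.Set.ofList numbers).foldl (fun dd i => dd.insert i (S i)) PySem.Dict.empty with hreg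
  have hitems : registro.items = (PySem.Set.ofList numbers).map (fun i => (i, S i)) := by
    have hfresh := PySem.Dict.items_foldl_insert_fresh (PySem.Set.ofList numbers)
      (fun a => a) S PySem.Dict.empty (fun a _ => by simp)
      (by simp [PySem.Set.nodup_ofList numbers])
    simpa using hfresh
  have hkeys : registro.keys = PySem.Set.ofList numbers := by
    simp only [PySem.Dict.keys, hitems, List.map_map]
    simp [Function.comp_def]
  have hvals : registro.values = (PySem.Set.ofList numbers).map S := by
    simp only [PySem.Dict.values, hitems, List.map_map]
    simp [Function.comp_def]
  have hnodup : registro.keys.Nodup := by rw [hkeys]; exact PySem.Set.nodup_ofList numbers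
  have hgetD : ∀ i ∈ PySem.Set.ofList numbers, registro.getD i 0 = S i := by
    intro i hi
    exact PySem.Dict.getD_of_mem_items registro (by rw [hitems]; exact List.mem_map.mpr ⟨i, hi, rfl⟩) hnodup 0
  have hmin : PySem.List.min? registro.values (fun x => x)
      = some ((t.map S).foldl min (S d)) := by
    rw [hvals, hD, List.map_cons, PySem.List.min?_id_cons]
  set M := (t.map S).foldl min (S d) with hM
  have hMle : ∀ j ∈ PySem.Set.ofList numbers, M ≤ S j := by
    intro j hj
    obtain ⟨h1, h2⟩ := PySem.List.foldl_min_le (t.map S) (S d)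
    rw [hD] at hj
    rcases List.mem_cons.mp hj with rfl | hj
    · exact h1
    · exact h2 _ (List.mem_map.mpr ⟨j, hj, rfl⟩)
  have hMmem : ∃ i₀ ∈ PySem.Set.ofList numbers, S i₀ = M := by
    rcases PySem.List.foldl_min_mem (t.map S) (S d) with h1 | h1
    · exact ⟨d, by rw [hD]; exact List.mem_cons_self, h1.symm⟩
    · obtain ⟨i₀, hi₀, hi₀'⟩ := List.mem_map.mp h1
      exact ⟨i₀, by rw [hD]; exact List.mem_cons_of_mem _ hi₀, hi₀'⟩
  set listAux := registro.keys.foldl (fun l i => if registro.getD i 0 = M then l ++ [i] else l) ([] : List Int) with hla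
  have hlaux : listAux = (PySem.Set.ofList numbers).filter (fun i => decide (S i = M)) := by
    rw [hla, hkeys]
    rw [PySem.List.foldl_congr_mem' (PySem.Set.ofList numbers) _
      (fun l i => if S i = M then l ++ [i] else l) []
      (fun x hx acc => by rw [hgetD x hx])]
    rw [PySem.List.foldl_append_ite_eq_filter (fun i => S i = M)]
    simp
  have hlne : listAux ≠ [] := by
    obtain ⟨i₀, hi₀, hi₀M⟩ := hMmem
    rw [hlaux]
    intro hnil
    have : i₀ ∈ (PySem.Set.ofList numbers).filter (fun i => decide (S i = M)) :=
      List.mem_filter.mpr ⟨hi₀, by simp [hi₀M]⟩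
    rw [hnil] at this
    exact absurd this (List.not_mem_nil)
  obtain ⟨A, hA⟩ : ∃ A, PySem.List.max? listAux (fun x => x) = some A := by
    cases hmax : PySem.List.max? listAux (fun x => x) with
    | none => exact absurd ((PySem.List.max?_eq_none_iff _ _).mp hmax) hlne
    | some A => exact ⟨A, rfl⟩
  have hAmem : A ∈ listAux := PySem.List.max?_mem hA
  have hAmax : ∀ y ∈ listAux, y ≤ A := PySem.List.max?_isMax hA
  have hresult : solucionar numbers = A := by
    show (match PySem.List.min? registro.values (fun x => x) with
          | none => (0 : Int)
          | some minimaSum =>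
            match PySem.List.max?
              (registro.keys.foldl (fun l i => if registro.getD i 0 = minimaSum then l ++ [i] else l) []) (fun x => x) with
            | none => 0
            | some m => m) = A
    rw [hmin]
    simp only [← hla, hA]
  have hAD : A ∈ PySem.Set.ofList numbers := (List.mem_filter.mp (hlaux ▸ hAmem)).1
  have hASM : S A = M := by
    have := (List.mem_filter.mp (hlaux ▸ hAmem)).2
    simpa using this
  rw [hresult]
  refine ⟨hAD, ?_⟩
  intro j hj
  have hsum : ∀ i, S i = numbers.sum - i * (numbers.count i : Int) := by
    intro i
    rw [hS]
    simpa using foldl_sum_excl numbers i 0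
  have hjle : M ≤ S j := hMle j hj
  by_cases hv : j * (numbers.count j : Int) = A * (numbers.count A : Int)
  · right
    refine ⟨hv, ?_⟩
    have hjM : S j = M := by
      rw [hsum j, hv, ← hsum A, hASM]
    exact hAmax j (by rw [hlaux]; exact List.mem_filter.mpr ⟨hj, by simp [hjM]⟩)
  · left
    have := hjle
    rw [hsum j, ← hASM, hsum A] at this
    omega

-- ===== VERDICT (by name: the statement is the Claim_ definition above) =====
theorem solucionar_spec : Claim_equal_solucionar := by
  intro numbers _ hpre
  unfold Spec_solucionar
  exact pvGood_unique (solucionar_good numbers hpre) (solucionar_alt_good numbers hpre)
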